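-- pv_equiv track=rewrite | github.com/CS-196-Applied-GenAI/assignment-1-Francesco-Boccuzzi | pseudocode/route-planning.py | suggest_alternative_routes
-- ===== SOURCE A (Python) =====
-- def suggest_alternative_routes(start, destination, route_map, num_alternatives=3):
--     """
--     Suggest alternative routes if the shortest route is unavailable.
--
--     Parameters
--     ----------
--     start : str
--         Starting location
--     destination : str
--         Destination location
--     route_map : dict
--         Dictionary mapping starting points to destinations
--     num_alternatives : int
--         Number of alternative routes to find (default: 3)
--
--     Returns
--     -------
--     list
--         List of alternative routes, each as (path, distance) tuple
--     """
--     alternatives = []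
--     visited_routes = set()
--
--     # Generate alternative routes by exploring different paths
--     def dfs(current, target, path, distance, max_depth=5):
--         if len(alternatives) >= num_alternatives:
--             return
--
--         if current == target:
--             route_key = tuple(path)
--             if route_key not in visited_routes:
--                 visited_routes.add(route_key)
--                 alternatives.append((path.copy(), distance))
--             return
--
--         if max_depth <= 0:
--             return
--
--         if current in route_map:
--             for neighbor, edge_distance in route_map[current]:
--                 if neighbor not in path:  # Avoid cycles
--                     path.append(neighbor)
--                     dfs(neighbor, target, path, distance + edge_distance, max_depth - 1)
--                     path.pop()
--
--     dfs(start, destination, [start], 0)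
--
--     # Sort alternatives by distance
--     alternatives.sort(key=lambda x: x[1])
--     return alternatives
-- ===== SOURCE B (Python) =====
-- def suggest_alternative_routes(start, destination, route_map, num_alternatives=3):
--     """Pure re-implementation: enumerate all depth-limited simple routes first,
--     then dedup by path (first occurrence), truncate, and sort by distance."""
--
--     def routes(current, path, distance, depth):
--         if current == destination:
--             return [(path, distance)]
--         if depth <= 0:
--             return []
--         found = []
--         for neighbor, edge_distance in route_map.get(current, []):
--             if neighbor not in path:
--                 found.extend(routes(neighbor, path + [neighbor],
--                                     distance + edge_distance, depth - 1))
--         return found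
--
--     seen = set()
--     unique = []
--     for path, dist in routes(start, [start], 0, 5):
--         key = tuple(path)
--         if key not in seen:
--             seen.add(key)
--             unique.append((path, dist))
--
--     selected = unique[:max(0, num_alternatives)]
--     selected.sort(key=lambda x: x[1])
--     return selected
-- ===== Notes on version B (the rewrite author's own statement) =====
-- stated objective: simpler
-- what changed: Replaced A's stateful early-exit DFS (shared mutable alternatives list and visited set threaded through a recursive closure) by a pure depth-limited enumeration of all simple routes, followed by a separate dedup-by-path pass, truncation to num_alternatives, and the same sort by distance.
import Mathlib
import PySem

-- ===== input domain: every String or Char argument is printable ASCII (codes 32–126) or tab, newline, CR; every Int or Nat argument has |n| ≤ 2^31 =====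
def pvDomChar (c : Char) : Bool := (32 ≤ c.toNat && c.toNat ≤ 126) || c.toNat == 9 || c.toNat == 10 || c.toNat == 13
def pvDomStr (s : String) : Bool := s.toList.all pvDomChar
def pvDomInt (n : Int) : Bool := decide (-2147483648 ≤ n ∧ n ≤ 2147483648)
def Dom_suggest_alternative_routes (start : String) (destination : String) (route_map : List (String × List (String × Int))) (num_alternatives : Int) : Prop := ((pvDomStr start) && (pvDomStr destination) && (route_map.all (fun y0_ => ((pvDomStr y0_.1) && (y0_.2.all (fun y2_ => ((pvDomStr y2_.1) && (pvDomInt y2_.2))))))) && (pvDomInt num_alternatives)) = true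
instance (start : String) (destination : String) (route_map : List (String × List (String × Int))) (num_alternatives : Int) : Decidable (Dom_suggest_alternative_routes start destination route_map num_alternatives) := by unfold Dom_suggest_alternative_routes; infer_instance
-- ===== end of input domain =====

-- B replaces A's stateful early-exit DFS (shared mutable alternatives/visited) by a pure
-- enumeration of all depth-limited routes followed by dedup-truncate-sort ("simpler").

-- ===== PORT A =====
-- A's nested `dfs` threads the mutable (alternatives, visited_routes) pair as explicit state;
-- the inner `for neighbor, edge_distance in route_map[current]` loop is `edgesA` (it receives
-- the already-decremented depth that each recursive call uses).
mutual
def dfsA (dest : String) (rm : PySem.Dict String (List (String × Int))) (na : Int)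
    (current : String) (path : List String) (distance : Int) (d : Nat)
    (st : List (List String × Int) × PySem.Set (List String)) :
    List (List String × Int) × PySem.Set (List String) :=
  if (st.1.length : Int) ≥ na then st
  else if current = dest then
    (if PySem.Set.contains st.2 path then st
     else (st.1 ++ [(path, distance)], PySem.Set.add st.2 path))
  else if d = 0 then st
  else match rm.get? current with
    | none => st
    | some edges => edgesA dest rm na path distance (d - 1) edges st

def edgesA (dest : String) (rm : PySem.Dict String (List (String × Int))) (na : Int)
    (path : List String) (distance : Int) (d' : Nat)
    (edges : List (String × Int))
    (st : List (List String × Int) × PySem.Set (List String)) :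
    List (List String × Int) × PySem.Set (List String) :=
  match edges with
  | [] => st
  | (nb, ed) :: rest =>
    edgesA dest rm na path distance d' rest
      (if nb ∈ path then st
       else dfsA dest rm na nb (path ++ [nb]) (distance + ed) d' st)
end

def suggest_alternative_routes (start : String) (destination : String) (route_map : List (String × List (String × Int))) (num_alternatives : Int) : List (List String × Int) :=
  let res := dfsA destination (PySem.Dict.mk route_map) num_alternatives start [start] 0 5 ([], PySem.Set.empty)
  PySem.List.sorted res.1 (fun x => x.2)

-- ===== PORT B =====
-- B's pure `routes` enumerator; `goB` is its `for` loop accumulating `found` via extend.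
mutual
def routesB (dest : String) (rm : PySem.Dict String (List (String × Int)))
    (current : String) (path : List String) (distance : Int) (depth : Nat) :
    List (List String × Int) :=
  if current = dest then [(path, distance)]
  else if depth = 0 then []
  else goB dest rm path distance (depth - 1) (rm.getD current []) []

def goB (dest : String) (rm : PySem.Dict String (List (String × Int)))
    (path : List String) (distance : Int) (depth' : Nat)
    (edges : List (String × Int)) (found : List (List String × Int)) :
    List (List String × Int) :=
  match edges with
  | [] => found
  | (nb, ed) :: rest =>
    goB dest rm path distance depth' rest
      (if nb ∈ path then found
       else found ++ routesB dest rm nb (path ++ [nb]) (distance + ed) depth')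
end

-- Source B's dedup loop over the enumerated routes (seen : set, unique : list).
def dedupB : List (List String × Int) → PySem.Set (List String) → List (List String × Int) → List (List String × Int)
  | [], _, unique => unique
  | (p, dist) :: rest, seen, unique =>
    if PySem.Set.contains seen p then dedupB rest seen unique
    else dedupB rest (PySem.Set.add seen p) (unique ++ [(p, dist)])

def suggest_alternative_routes_alt (start : String) (destination : String) (route_map : List (String × List (String × Int))) (num_alternatives : Int) : List (List String × Int) :=
  let rm := PySem.Dict.mk route_map
  let unique := dedupB (routesB destination rm start [start] 0 5) PySem.Set.empty []
  -- unique[:max(0, num_alternatives)] : the bound is nonnegative, so the slice is a take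
  let selected := unique.take (max 0 num_alternatives).toNat
  PySem.List.sorted selected (fun x => x.2)

-- ===== PRECONDITION & SPEC =====
def Spec_suggest_alternative_routes (start : String) (destination : String) (route_map : List (String × List (String × Int))) (num_alternatives : Int) (out : List (List String × Int)) : Prop := out = suggest_alternative_routes_alt start destination route_map num_alternatives
instance (start : String) (destination : String) (route_map : List (String × List (String × Int))) (num_alternatives : Int) (out : List (List String × Int)) : Decidable (Spec_suggest_alternative_routes start destination route_map num_alternatives out) := by unfold Spec_suggest_alternative_routes; infer_instance

-- ===== CLAIM (what is proved, stated in full; the proofs are below) =====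
def Claim_equal_suggest_alternative_routes : Prop := ∀ (start : String) (destination : String) (route_map : List (String × List (String × Int))) (num_alternatives : Int), Dom_suggest_alternative_routes start destination route_map num_alternatives → Spec_suggest_alternative_routes start destination route_map num_alternatives (suggest_alternative_routes start destination route_map num_alternatives)

-- ===== LEMMAS AND PROOFS =====

-- A's stateful DFS, reformulated: feeding a stream of found routes through the
-- "check budget, dedup, append" consumer that A applies at each dfs entry/target.
def consume (na : Int) (st : List (List String × Int) × PySem.Set (List String)) :
    List (List String × Int) → List (List String × Int) × PySem.Set (List String)
  | [] => st
  | (p, dist) :: rest =>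
    if (st.1.length : Int) ≥ na then st
    else if PySem.Set.contains st.2 p then consume na st rest
    else consume na (st.1 ++ [(p, dist)], PySem.Set.add st.2 p) rest

theorem consume_of_ge (na : Int) (st : List (List String × Int) × PySem.Set (List String))
    (l : List (List String × Int)) (h : (st.1.length : Int) ≥ na) :
    consume na st l = st := by
  cases l with
  | nil => rfl
  | cons x rest => cases x; simp [consume, h]

theorem consume_append (na : Int) (st : List (List String × Int) × PySem.Set (List String))
    (l1 l2 : List (List String × Int)) :
    consume na st (l1 ++ l2) = consume na (consume na st l1) l2 := by
  induction l1 generalizing st with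
  | nil => rfl
  | cons x rest ih =>
    obtain ⟨p, dist⟩ := x
    rw [List.cons_append, consume, consume]
    by_cases hge : (st.1.length : Int) ≥ na
    · rw [if_pos hge, if_pos hge, consume_of_ge na st l2 hge]
    · rw [if_neg hge, if_neg hge]
      by_cases hc : PySem.Set.contains st.2 p = true
      · rw [if_pos hc, if_pos hc, ih]
      · rw [if_neg hc, if_neg hc, ih]

theorem goB_acc (dest : String) (rm : PySem.Dict String (List (String × Int)))
    (path : List String) (distance : Int) (d' : Nat)
    (edges : List (String × Int)) (found : List (List String × Int)) :
    goB dest rm path distance d' edges found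
      = found ++ goB dest rm path distance d' edges [] := by
  induction edges generalizing found with
  | nil => simp [goB]
  | cons e rest ih =>
    obtain ⟨nb, ed⟩ := e
    rw [goB, goB]
    by_cases hm : nb ∈ path
    · rw [if_pos hm, if_pos hm, ih]
    · rw [if_neg hm, if_neg hm, List.nil_append,
        ih (found ++ routesB dest rm nb (path ++ [nb]) (distance + ed) d'),
        ih (routesB dest rm nb (path ++ [nb]) (distance + ed) d'), List.append_assoc]

-- The for-loop of A equals consuming B's enumeration of the same edges,
-- given the correspondence at the child depth.
theorem edgesA_eq_consume (dest : String) (rm : PySem.Dict String (List (String × Int)))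
    (na : Int) (d' : Nat)
    (h1 : ∀ current path distance st,
      dfsA dest rm na current path distance d' st
        = consume na st (routesB dest rm current path distance d')) :
    ∀ (edges : List (String × Int)) (path : List String) (distance : Int) st,
      edgesA dest rm na path distance d' edges st
        = consume na st (goB dest rm path distance d' edges []) := by
  intro edges
  induction edges with
  | nil => intro path distance st; rw [edgesA, goB]; rfl
  | cons e rest ih =>
    obtain ⟨nb, ed⟩ := e
    intro path distance st
    rw [edgesA, goB]
    by_cases hm : nb ∈ path
    · rw [if_pos hm, if_pos hm, ih]
    · rw [if_neg hm, if_neg hm, List.nil_append, goB_acc, consume_append, ← h1, ih]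

theorem dfsA_eq_consume (dest : String) (rm : PySem.Dict String (List (String × Int)))
    (na : Int) :
    ∀ (d : Nat) (current : String) (path : List String) (distance : Int) st,
      dfsA dest rm na current path distance d st
        = consume na st (routesB dest rm current path distance d) := by
  intro d
  induction d with
  | zero =>
    intro current path distance st
    rw [dfsA, routesB]
    by_cases hge : (st.1.length : Int) ≥ na
    · rw [if_pos hge, consume_of_ge na st _ hge]
    · by_cases hd : current = dest
      · simp [hge, hd, consume]
      · simp [hge, hd, consume]
  | succ n ih =>
    intro current path distance st
    rw [dfsA, routesB]
    by_cases hge : (st.1.length : Int) ≥ na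
    · rw [if_pos hge, consume_of_ge na st _ hge]
    · by_cases hd : current = dest
      · simp [hge, hd, consume]
      · simp only [hge, hd, if_neg, Nat.succ_ne_zero, not_false_eq_true]
        rcases hg : rm.get? current with _ | edges
        · have hz : rm.getD current [] = [] := by
            rw [PySem.Dict.getD_eq_get?_getD, hg]; rfl
          rw [hz, goB]; rfl
        · have hz : rm.getD current [] = edges := by
            rw [PySem.Dict.getD_eq_get?_getD, hg]; rfl
          rw [hz]
          exact edgesA_eq_consume dest rm na n ih edges path distance st

theorem dedupB_acc (l : List (List String × Int)) (seen : PySem.Set (List String))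
    (u : List (List String × Int)) :
    dedupB l seen u = u ++ dedupB l seen [] := by
  induction l generalizing seen u with
  | nil => simp [dedupB]
  | cons x rest ih =>
    obtain ⟨p, dist⟩ := x
    rw [dedupB, dedupB]
    by_cases hc : PySem.Set.contains seen p = true
    · rw [if_pos hc, if_pos hc, ih]
    · rw [if_neg hc, if_neg hc, List.nil_append, ih (PySem.Set.add seen p) (u ++ [(p, dist)]),
        ih (PySem.Set.add seen p) [(p, dist)], List.append_assoc]

-- Budgeted consumption from a state = the state's list plus a truncated dedup of the stream.
theorem consume_eq_take_dedup (na : Int) :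
    ∀ (l : List (List String × Int)) (alts : List (List String × Int))
      (seen : PySem.Set (List String)),
      (consume na (alts, seen) l).1
        = alts ++ (dedupB l seen []).take ((max 0 na).toNat - alts.length) := by
  intro l
  induction l with
  | nil => intro alts seen; simp [consume, dedupB]
  | cons x rest ih =>
    obtain ⟨p, dist⟩ := x
    intro alts seen
    rw [consume, dedupB]
    by_cases hge : ((alts, seen).1.length : Int) ≥ na
    · have hz : (max 0 na).toNat - alts.length = 0 := by simp at hge ⊢; omega
      rw [if_pos hge, hz]
      simp
    · have hpos : 1 ≤ (max 0 na).toNat - alts.length := by simp at hge ⊢; omega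
      rw [if_neg hge]
      by_cases hc : PySem.Set.contains seen p = true
      · rw [if_pos hc, if_pos hc, ih]
      · rw [if_neg hc, if_neg hc, List.nil_append, ih,
          dedupB_acc rest (PySem.Set.add seen p) [(p, dist)],
          List.take_append]
        have h1 : (max 0 na).toNat - alts.length - [(p, dist)].length
            = (max 0 na).toNat - (alts ++ [(p, dist)]).length := by
          simp [Nat.sub_sub]
        rw [List.take_of_length_le (l := [(p, dist)]) (by simpa using hpos), h1,
          List.append_assoc]

-- ===== VERDICT (by name: the statement is the Claim_ definition above) =====
theorem suggest_alternative_routes_spec : Claim_equal_suggest_alternative_routes := by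
  intro start destination route_map num_alternatives _
  unfold Spec_suggest_alternative_routes
  simp only [suggest_alternative_routes, suggest_alternative_routes_alt]
  rw [dfsA_eq_consume]
  rw [consume_eq_take_dedup num_alternatives _ ([]) PySem.Set.empty]
  simp [PySem.Set.empty]
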